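-- pv_equiv track=rewrite | github.com/suraj-iitb/algorithm-identification | tbcnn/crawler/data/shell/python3/shell2548995.py | generateG
-- ===== SOURCE A (Python) =====
-- def generateG(n):
--     if n == 1:
--         return [1]
--     g = []
--     h = 1
--     while h < n:
--         g.append(h)
--         h = 3*h+1
--     g.reverse()
--     return g
-- ===== SOURCE B (Python) =====
-- def generateG(n):
--     if n == 1:
--         return [1]
--     if n <= 1:
--         return []
--     # climb to the largest Knuth gap below n, then walk down via the
--     # inverse map h -> (h-1)//3, emitting gaps largest-first (no reverse)
--     h = 1
--     while 3 * h + 1 < n: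
--         h = 3 * h + 1
--     g = []
--     while h >= 1:
--         g.append(h)
--         h = (h - 1) // 3
--     return g
-- ===== Notes on version B (the rewrite author's own statement) =====
-- stated objective: alternative
-- what changed: Instead of appending gaps ascending and calling reverse(), B first climbs to the largest Knuth gap below n and then emits the descending sequence directly by stepping down with the inverse of the gap recurrence, building the output largest-first in one forward pass with no reverse.
import Mathlib
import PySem

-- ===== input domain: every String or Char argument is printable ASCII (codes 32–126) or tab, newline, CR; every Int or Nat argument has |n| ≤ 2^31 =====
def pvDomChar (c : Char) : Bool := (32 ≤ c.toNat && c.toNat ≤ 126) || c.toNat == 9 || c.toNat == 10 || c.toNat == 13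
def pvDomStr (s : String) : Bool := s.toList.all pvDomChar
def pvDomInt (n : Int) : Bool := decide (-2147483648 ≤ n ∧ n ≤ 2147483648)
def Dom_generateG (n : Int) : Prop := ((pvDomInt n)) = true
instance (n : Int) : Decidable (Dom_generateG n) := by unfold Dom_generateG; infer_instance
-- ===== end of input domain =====

-- B climbs to the largest Knuth gap below n, then emits the descending sequence directly by inverting the recurrence (h -> (h-1)//3), replacing A's append-ascending-then-reverse loop; alternative decomposition, same values.


-- ===== PORT A =====
-- A's while loop: append h then triple; 1 ≤ h is an invariant carried for termination
def generateGLoop (n h : Int) (hh : 1 ≤ h) (g : List Int) : List Int :=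
  if hlt : h < n then generateGLoop n (3*h+1) (by omega) (g ++ [h]) else g
termination_by (n - h).toNat
decreasing_by omega

def generateG (n : Int) : List Int :=
  if n = 1 then [1]
  else (generateGLoop n 1 (by omega) []).reverse

-- ===== PORT B =====
-- first loop of B: advance h while 3*h+1 < n (reaches the largest gap below n)
def gFind (n h : Int) (hh : 1 ≤ h) : Int :=
  if 3*h+1 < n then gFind n (3*h+1) (by omega) else h
termination_by (n - h).toNat
decreasing_by omega

-- termination fact for the second loop: (h-1)//3 < h for 1 ≤ h
theorem gStep_lt (h : Int) (hh : 1 ≤ h) :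
    (PySem.Int.floordiv (h-1) 3).toNat < h.toNat := by
  rw [PySem.Int.floordiv_eq_ediv_of_pos (by omega : (0:Int) < 3)]
  omega

-- second loop of B: append h then step down with h = (h-1)//3, until h < 1
def gBuild (h : Int) (g : List Int) : List Int :=
  if h1 : 1 ≤ h then gBuild (PySem.Int.floordiv (h-1) 3) (g ++ [h]) else g
termination_by h.toNat
decreasing_by exact gStep_lt h h1

def generateG_alt (n : Int) : List Int :=
  if n = 1 then [1]
  else if n ≤ 1 then []
  else gBuild (gFind n 1 (by omega)) []

-- ===== PRECONDITION & SPEC =====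
def Spec_generateG (n : Int) (out : List Int) : Prop := out = generateG_alt n
instance (n : Int) (out : List Int) : Decidable (Spec_generateG n out) := by unfold Spec_generateG; infer_instance

-- ===== CLAIM (what is proved, stated in full; the proofs are below) =====
def Claim_equal_generateG : Prop := ∀ (n : Int), Dom_generateG n → Spec_generateG n (generateG n)

-- ===== LEMMAS AND PROOFS =====
-- proof-side view of A's ascending gap list (no accumulator)
def ascList (n h : Int) (hh : 1 ≤ h) : List Int :=
  if hlt : h < n then h :: ascList n (3*h+1) (by omega) else []
termination_by (n - h).toNat
decreasing_by omega

theorem loop_eq_asc (n h : Int) (hh : 1 ≤ h) (g : List Int) :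
    generateGLoop n h hh g = g ++ ascList n h hh := by
  induction h, hh, g using generateGLoop.induct n with
  | case1 h hh g hlt ih =>
      rw [generateGLoop, dif_pos hlt, ih]
      conv_rhs => rw [ascList]
      rw [dif_pos hlt]
      simp
  | case2 h hh g hlt =>
      rw [generateGLoop, dif_neg hlt, ascList, dif_neg hlt]
      simp

-- proof-side view of B's descending walk (no accumulator)
def descList (h : Int) : List Int :=
  if h1 : 1 ≤ h then h :: descList (PySem.Int.floordiv (h-1) 3) else []
termination_by h.toNat
decreasing_by exact gStep_lt h h1

theorem build_eq_desc (h : Int) (g : List Int) :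
    gBuild h g = g ++ descList h := by
  induction h, g using gBuild.induct with
  | case1 h g h1 ih =>
      rw [gBuild, dif_pos h1, ih]
      conv_rhs => rw [descList]
      rw [dif_pos h1]
      simp
  | case2 h g h1 =>
      rw [gBuild, dif_neg h1, descList, dif_neg h1]
      simp

theorem step_inverse (h : Int) : PySem.Int.floordiv (3*h+1-1) 3 = h := by
  rw [PySem.Int.floordiv_eq_ediv_of_pos (by omega : (0:Int) < 3)]
  omega

theorem desc_zero : descList (PySem.Int.floordiv (1-1) 3) = [] := by
  rw [descList]
  rw [PySem.Int.floordiv_eq_ediv_of_pos (by omega : (0:Int) < 3)]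
  simp

-- the core correspondence: walking down from gFind's result yields the
-- reverse of A's ascending list, followed by the walk below the start h
theorem desc_find_eq (n h : Int) (hh : 1 ≤ h) :
    h < n → descList (gFind n h hh) = (ascList n h hh).reverse ++ descList (PySem.Int.floordiv (h-1) 3) := by
  induction h, hh using gFind.induct n with
  | case1 h hh hlt ih =>
      intro hn
      rw [gFind, if_pos hlt, ih (by omega), step_inverse]
      conv_rhs => rw [ascList]
      rw [dif_pos hn]
      conv_lhs => rw [descList]
      rw [dif_pos hh]
      simp
  | case2 h hh hlt =>
      intro hn
      rw [gFind, if_neg hlt, ascList, dif_pos hn, ascList, dif_neg hlt, descList, dif_pos hh]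
      simp

-- ===== VERDICT (by name: the statement is the Claim_ definition above) =====
theorem generateG_spec : Claim_equal_generateG := by
  intro n _
  unfold Spec_generateG generateG generateG_alt
  split
  · rfl
  · rename_i hne
    rw [loop_eq_asc]
    by_cases h1 : n ≤ 1
    · rw [ascList]
      simp [h1, show ¬ (1:Int) < n by omega]
    · rw [build_eq_desc, desc_find_eq n 1 (by omega) (by omega), desc_zero]
      simp [h1]
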